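-- pv_equiv track=rewrite | github.com/muhamadanjar/fastapi-etl | app/tasks/__init__.py | get_task_module
-- ===== SOURCE A (Python) =====
-- TASK_CATEGORIES = {
--     'etl': [
--         'process_file', 'transform_data', 'execute_job',
--         'validate_quality', 'generate_lineage'
--     ],
--     'data_management': [
--         'cleanup_files', 'backup_data', 'archive_data', 'purge_records'
--     ],
--     'monitoring': [
--         'health_check', 'collect_metrics', 'performance_report',
--         'check_jobs', 'send_alerts'
--     ],
--     'maintenance': [
--         'cleanup_temp', 'cleanup_logs', 'optimize_db',
--         'cleanup_failed', 'vacuum_db', 'cleanup_orphaned', 'reset_stuck'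
--     ]
-- }
--
-- def get_task_module(task_name: str) -> str:
--     """Get the module name for a task based on its category"""
--     for category, tasks in TASK_CATEGORIES.items():
--         if task_name in tasks:
--             if category == 'etl':
--                 return 'etl_tasks'
--             elif category == 'monitoring':
--                 return 'monitoring_tasks'
--             elif category in ['maintenance', 'data_management']:
--                 return 'cleanup_tasks'
--     return 'etl_tasks'  # default
-- ===== SOURCE B (Python) =====
-- TASK_MODULE_MAP = {
--     'process_file': 'etl_tasks', 'transform_data': 'etl_tasks',
--     'execute_job': 'etl_tasks', 'validate_quality': 'etl_tasks',
--     'generate_lineage': 'etl_tasks',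
--     'cleanup_files': 'cleanup_tasks', 'backup_data': 'cleanup_tasks',
--     'archive_data': 'cleanup_tasks', 'purge_records': 'cleanup_tasks',
--     'health_check': 'monitoring_tasks', 'collect_metrics': 'monitoring_tasks',
--     'performance_report': 'monitoring_tasks', 'check_jobs': 'monitoring_tasks',
--     'send_alerts': 'monitoring_tasks',
--     'cleanup_temp': 'cleanup_tasks', 'cleanup_logs': 'cleanup_tasks',
--     'optimize_db': 'cleanup_tasks', 'cleanup_failed': 'cleanup_tasks',
--     'vacuum_db': 'cleanup_tasks', 'cleanup_orphaned': 'cleanup_tasks',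
--     'reset_stuck': 'cleanup_tasks',
-- }
--
-- def get_task_module(task_name: str) -> str:
--     """Get the module name for a task based on its category"""
--     return TASK_MODULE_MAP.get(task_name, 'etl_tasks')
-- ===== Notes on version B (the rewrite author's own statement) =====
-- stated objective: simpler
-- what changed: Replaced the per-category loop with membership tests and an if/elif chain on the category name by one precomputed flat dict mapping each task name directly to its module, so the lookup is a single dict.get with default.
import Mathlib
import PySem

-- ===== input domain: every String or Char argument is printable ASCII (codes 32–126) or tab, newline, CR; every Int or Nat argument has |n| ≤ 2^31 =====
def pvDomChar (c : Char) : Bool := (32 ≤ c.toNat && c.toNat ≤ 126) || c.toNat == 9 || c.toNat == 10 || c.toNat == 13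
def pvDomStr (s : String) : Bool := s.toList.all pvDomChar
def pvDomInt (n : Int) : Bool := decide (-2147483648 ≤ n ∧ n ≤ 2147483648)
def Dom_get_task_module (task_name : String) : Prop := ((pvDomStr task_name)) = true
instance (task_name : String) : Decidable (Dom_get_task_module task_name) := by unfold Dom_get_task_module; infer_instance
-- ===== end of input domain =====

-- B replaces the per-category loop and if/elif chain by one precomputed flat task→module dictionary looked up once (objective: simpler).
-- ===== PORT A =====
-- TASK_CATEGORIES as an insertion-ordered list of (category, tasks)
def TASK_CATEGORIES : List (String × List String) :=
  [("etl", ["process_file", "transform_data", "execute_job", "validate_quality", "generate_lineage"]),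
   ("data_management", ["cleanup_files", "backup_data", "archive_data", "purge_records"]),
   ("monitoring", ["health_check", "collect_metrics", "performance_report", "check_jobs", "send_alerts"]),
   ("maintenance", ["cleanup_temp", "cleanup_logs", "optimize_db", "cleanup_failed", "vacuum_db", "cleanup_orphaned", "reset_stuck"])]

-- literal port of A's for-loop over TASK_CATEGORIES.items() with the if/elif chain
def get_task_module_loop : List (String × List String) → String → String
  | [], _ => "etl_tasks"  -- default
  | (category, tasks) :: rest, task_name =>
      if tasks.contains task_name then
        if category == "etl" then "etl_tasks"
        else if category == "monitoring" then "monitoring_tasks"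
        else if ["maintenance", "data_management"].contains category then "cleanup_tasks"
        else get_task_module_loop rest task_name
      else get_task_module_loop rest task_name

def get_task_module (task_name : String) : String :=
  get_task_module_loop TASK_CATEGORIES task_name

-- ===== PORT B =====
-- flat precomputed task → module dictionary
def TASK_MODULE_MAP : PySem.Dict String String :=
  PySem.Dict.ofList [("process_file", "etl_tasks"),
    ("transform_data", "etl_tasks"),
    ("execute_job", "etl_tasks"),
    ("validate_quality", "etl_tasks"),
    ("generate_lineage", "etl_tasks"),
    ("cleanup_files", "cleanup_tasks"),
    ("backup_data", "cleanup_tasks"),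
    ("archive_data", "cleanup_tasks"),
    ("purge_records", "cleanup_tasks"),
    ("health_check", "monitoring_tasks"),
    ("collect_metrics", "monitoring_tasks"),
    ("performance_report", "monitoring_tasks"),
    ("check_jobs", "monitoring_tasks"),
    ("send_alerts", "monitoring_tasks"),
    ("cleanup_temp", "cleanup_tasks"),
    ("cleanup_logs", "cleanup_tasks"),
    ("optimize_db", "cleanup_tasks"),
    ("cleanup_failed", "cleanup_tasks"),
    ("vacuum_db", "cleanup_tasks"),
    ("cleanup_orphaned", "cleanup_tasks"),
    ("reset_stuck", "cleanup_tasks")]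

def get_task_module_alt (task_name : String) : String :=
  TASK_MODULE_MAP.getD task_name "etl_tasks"

-- ===== PRECONDITION & SPEC =====
def Spec_get_task_module (task_name : String) (out : String) : Prop := out = get_task_module_alt task_name
instance (task_name : String) (out : String) : Decidable (Spec_get_task_module task_name out) := by unfold Spec_get_task_module; infer_instance

-- ===== CLAIM (what is proved, stated in full; the proofs are below) =====
def Claim_equal_get_task_module : Prop := ∀ (task_name : String), Dom_get_task_module task_name → Spec_get_task_module task_name (get_task_module task_name)

-- ===== LEMMAS AND PROOFS =====

-- ===== VERDICT (by name: the statement is the Claim_ definition above) =====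
theorem get_task_module_spec : Claim_equal_get_task_module := by
  intro s _
  unfold Spec_get_task_module
  by_cases h : s ∈ ["process_file", "transform_data", "execute_job", "validate_quality", "generate_lineage", "cleanup_files", "backup_data", "archive_data", "purge_records", "health_check", "collect_metrics", "performance_report", "check_jobs", "send_alerts", "cleanup_temp", "cleanup_logs", "optimize_db", "cleanup_failed", "vacuum_db", "cleanup_orphaned", "reset_stuck"]
  · simp only [List.mem_cons, List.not_mem_nil, or_false] at h
    rcases h with rfl|rfl|rfl|rfl|rfl|rfl|rfl|rfl|rfl|rfl|rfl|rfl|rfl|rfl|rfl|rfl|rfl|rfl|rfl|rfl|rfl <;> decide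
  · simp only [List.mem_cons, List.not_mem_nil, or_false, not_or] at h
    obtain ⟨h1,h2,h3,h4,h5,h6,h7,h8,h9,h10,h11,h12,h13,h14,h15,h16,h17,h18,h19,h20,h21⟩ := h
    simp [get_task_module, get_task_module_alt, TASK_CATEGORIES, TASK_MODULE_MAP,
          get_task_module_loop, PySem.Dict.ofList, PySem.Dict.update, PySem.Dict.getD_insert, PySem.Dict.getD_empty,
          h1,h2,h3,h4,h5,h6,h7,h8,h9,h10,h11,h12,h13,h14,h15,h16,h17,h18,h19,h20,h21]
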